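-- pv_equiv track=rewrite | github.com/hassani-nassur/runtrack-python | jour04/job14.py | decoupage
-- ===== SOURCE A (Python) =====
-- def decoupage(chaine):
--     txt=''
--     table=[]
--     for i in chaine:
--         if i == ' ':
--             table += [txt]
--             txt =''
--         else :
--             txt +=i
--     table += [txt]
--     return table
-- ===== SOURCE B (Python) =====
-- def decoupage(chaine):
--     table = []
--     start = 0
--     while True:
--         idx = chaine.find(' ', start)
--         if idx == -1:
--             table.append(chaine[start:])
--             return table
--         table.append(chaine[start:idx])
--         start = idx + 1
-- ===== Notes on version B (the rewrite author's own statement) =====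
-- stated objective: faster
-- what changed: B locates separator positions with str.find and slices chunk-by-chunk from a start index instead of scanning character by character while building a growing string buffer.
import Mathlib
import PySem

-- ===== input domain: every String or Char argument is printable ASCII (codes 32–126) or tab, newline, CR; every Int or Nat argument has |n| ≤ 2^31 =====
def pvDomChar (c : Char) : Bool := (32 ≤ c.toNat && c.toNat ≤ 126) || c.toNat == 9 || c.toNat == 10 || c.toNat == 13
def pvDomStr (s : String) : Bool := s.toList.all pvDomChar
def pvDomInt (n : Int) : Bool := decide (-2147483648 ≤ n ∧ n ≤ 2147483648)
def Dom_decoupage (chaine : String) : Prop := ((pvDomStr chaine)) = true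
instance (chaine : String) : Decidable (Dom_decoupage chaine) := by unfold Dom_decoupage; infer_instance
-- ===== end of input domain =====

-- B splits by locating separator positions and slicing chunk-by-chunk (find/slice recursion)
-- instead of A's character-by-character scan with a growing buffer; same return value.


-- ===== PORT A =====
-- state: (txt, table); 'txt += i' is txt ++ [i], 'table += [txt]' appends the string
def decoupage (chaine : String) : List String :=
  let r := chaine.toList.foldl
    (fun (s : List Char × List String) (i : Char) =>
      if i == ' ' then ([], s.2 ++ [String.ofList s.1]) else (s.1 ++ [i], s.2))
    ([], [])
  r.2 ++ [String.ofList r.1]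

-- ===== PORT B =====
-- 'chaine.find(' ', start)' on the remaining suffix = takeWhile non-space (the chunk
-- chaine[start:idx]) and dropWhile non-space (the rest); find = -1 ↔ rest is empty.
def decoupageAltGo (cs : List Char) : List String :=
  let pre := cs.takeWhile (fun c => !(c == ' '))
  match _h : cs.dropWhile (fun c => !(c == ' ')) with
  | [] => [String.ofList pre]
  | _ :: t => String.ofList pre :: decoupageAltGo t
termination_by cs.length
decreasing_by
  have hle := List.length_dropWhile_le (fun c => !(c == ' ')) cs
  rw [_h] at hle; simp at hle; omega

def decoupage_alt (chaine : String) : List String := decoupageAltGo chaine.toList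

-- ===== PRECONDITION & SPEC =====
def Spec_decoupage (chaine : String) (out : List String) : Prop := out = decoupage_alt chaine
instance (chaine : String) (out : List String) : Decidable (Spec_decoupage chaine out) := by unfold Spec_decoupage; infer_instance

-- ===== CLAIM (what is proved, stated in full; the proofs are below) =====
def Claim_equal_decoupage : Prop := ∀ (chaine : String), Dom_decoupage chaine → Spec_decoupage chaine (decoupage chaine)

-- ===== LEMMAS AND PROOFS =====

theorem altGo_drop_nil (cs : List Char) (h : cs.dropWhile (fun c => !(c == ' ')) = []) :
    decoupageAltGo cs = [String.ofList (cs.takeWhile (fun c => !(c == ' ')))] := by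
  rw [decoupageAltGo]
  split
  · rfl
  · rename_i heq; rw [h] at heq; cases heq

theorem altGo_drop_cons (cs : List Char) (b : Char) (t : List Char)
    (h : cs.dropWhile (fun c => !(c == ' ')) = b :: t) :
    decoupageAltGo cs = String.ofList (cs.takeWhile (fun c => !(c == ' '))) :: decoupageAltGo t := by
  rw [decoupageAltGo]
  split
  · rename_i heq; rw [h] at heq; cases heq
  · rename_i b' t' heq; rw [h] at heq; cases heq; rfl

theorem takeWhile_prefix (txt cs : List Char) (h : ∀ c ∈ txt, (c == ' ') = false) :
    (txt ++ cs).takeWhile (fun c => !(c == ' ')) = txt ++ cs.takeWhile (fun c => !(c == ' ')) := by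
  induction txt with
  | nil => rfl
  | cons a l ih =>
    have ha := h a (by simp)
    simp only [List.cons_append, List.takeWhile_cons, ha, Bool.not_false, if_true]
    rw [ih (fun c hc => h c (by simp [hc]))]

theorem dropWhile_prefix (txt cs : List Char) (h : ∀ c ∈ txt, (c == ' ') = false) :
    (txt ++ cs).dropWhile (fun c => !(c == ' ')) = cs.dropWhile (fun c => !(c == ' ')) := by
  induction txt with
  | nil => rfl
  | cons a l ih =>
    have ha := h a (by simp)
    simp only [List.cons_append, List.dropWhile_cons, ha, Bool.not_false, if_true]
    exact ih (fun c hc => h c (by simp [hc]))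

theorem main_inv (cs : List Char) : ∀ (txt : List Char) (table : List String),
    (∀ c ∈ txt, (c == ' ') = false) →
    (let r := cs.foldl
        (fun (s : List Char × List String) (i : Char) =>
          if i == ' ' then ([], s.2 ++ [String.ofList s.1]) else (s.1 ++ [i], s.2))
        (txt, table)
     r.2 ++ [String.ofList r.1]) = table ++ decoupageAltGo (txt ++ cs) := by
  induction cs with
  | nil =>
    intro txt table h
    have hd : (txt ++ ([] : List Char)).dropWhile (fun c => !(c == ' ')) = [] :=
      dropWhile_prefix txt [] h
    rw [altGo_drop_nil _ hd, takeWhile_prefix txt [] h]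
    simp [List.foldl]
  | cons c cs ih =>
    intro txt table h
    by_cases hc : c = ' '
    · subst hc
      have hd : (txt ++ ' ' :: cs).dropWhile (fun c => !(c == ' ')) = ' ' :: cs := by
        rw [dropWhile_prefix txt _ h]; simp
      have ht : (txt ++ ' ' :: cs).takeWhile (fun c => !(c == ' ')) = txt := by
        rw [takeWhile_prefix txt _ h]; simp
      rw [altGo_drop_cons _ _ _ hd, ht]
      have := ih [] (table ++ [String.ofList txt]) (by simp)
      simp only [List.nil_append] at this
      simp only [List.foldl_cons, beq_self_eq_true, if_true]
      rw [this]
      simp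
    · have hcb : (c == ' ') = false := by simp [hc]
      have := ih (txt ++ [c]) table (by
        intro x hx
        rcases List.mem_append.mp hx with h1 | h1
        · exact h x h1
        · simp at h1; subst h1; exact hcb)
      simp only [List.foldl_cons, hcb, Bool.false_eq_true, if_false]
      rw [this]
      simp

-- ===== VERDICT (by name: the statement is the Claim_ definition above) =====
theorem decoupage_spec : Claim_equal_decoupage := by
  intro chaine _
  unfold Spec_decoupage decoupage decoupage_alt
  have := main_inv chaine.toList [] [] (by simp)
  simpa using this
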